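-- pv_equiv track=rewrite | github.com/liuyang1/toy264 | bin.py | onebytefield
-- ===== SOURCE A (Python) =====
-- def extBit(b, left, right):
--     r"""
--     extract bit from [left, right] bits
--     >>> extBit(0x67, 7, 5)
--     3
--     """
--     mask = 2 ** left - 2 ** right
--     v = (b & mask) >> right
--     return v
--
-- def onebytefield(b, widlst):
--     r"""
--     split one byte based on field list
--     >>> onebytefield(0x67, [1, 2, 5])
--     [0, 3, 7]
--     >>> onebytefield(0xff, [1, 2, 5])
--     [1, 3, 31]
--     """
--     assert sum(widlst) == 8
--     left, right = 8, 8
--     ret = []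
--     for i in widlst:
--         right -= i
--         v = extBit(b, left, right)
--         ret.append(v)
--         left -= i
--     return ret
-- ===== SOURCE B (Python) =====
-- def onebytefield(b, widlst):
--     assert sum(widlst) == 8
--     bits = format(b & 0xff, '08b')
--     ret = []
--     pos = 0
--     for i in widlst:
--         chunk = bits[pos:pos + i]
--         ret.append(int(chunk, 2) if chunk else 0)
--         pos += i
--     return ret
-- ===== Notes on version B (the rewrite author's own statement) =====
-- stated objective: idiomatic
-- what changed: B formats the low byte as an 8-char binary string once and slices consecutive chunks with a moving cursor, parsing each with int(chunk, 2), instead of mask-and-shift arithmetic with two moving bit pointers.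
-- outside the precondition, e.g. on onebytefield(103, [-1, 9]): A returns [0, 103], B returns [51, 1]
import Mathlib
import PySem

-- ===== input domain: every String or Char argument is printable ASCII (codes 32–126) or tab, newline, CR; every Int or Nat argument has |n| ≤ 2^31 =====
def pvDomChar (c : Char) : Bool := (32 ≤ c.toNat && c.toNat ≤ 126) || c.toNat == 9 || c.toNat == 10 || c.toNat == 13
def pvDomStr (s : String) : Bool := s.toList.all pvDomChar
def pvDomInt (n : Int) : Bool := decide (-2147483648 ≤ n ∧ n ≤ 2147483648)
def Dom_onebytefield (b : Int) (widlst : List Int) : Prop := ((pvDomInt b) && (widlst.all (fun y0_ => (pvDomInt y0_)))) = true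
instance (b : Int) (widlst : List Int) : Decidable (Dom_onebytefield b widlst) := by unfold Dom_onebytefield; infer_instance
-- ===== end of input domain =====

-- B splits the byte by slicing an 8-character binary string with a moving cursor instead of
-- A's mask-and-shift arithmetic with two moving bit pointers (objective: idiomatic).

-- ===== PORT A =====
def extBit (b left right : Int) : Int :=
  let mask : Int := 2 ^ left.toNat - 2 ^ right.toNat   -- exponents are ≥ 0 on every input Pre_ admits
  (PySem.Int.band b mask) >>> right.toNat

def onebytefield (b : Int) (widlst : List Int) : List Int :=
  -- state (left, right, ret); the assert is Pre_onebytefield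
  (widlst.foldl (fun (s : Int × Int × List Int) i =>
      let right := s.2.1 - i
      let v := extBit b s.1 right
      (s.1 - i, right, s.2.2 ++ [v])) ((8 : Int), (8 : Int), ([] : List Int))).2.2

-- ===== PORT B =====
-- int(chunk, 2); the `none` branch is unreachable (chunk is nonempty binary digits), kept total
def chunkVal (chunk : List Char) : Int :=
  match PySem.Int.ofCharsBase? chunk 2 with
  | some v => v
  | none => 0

def onebytefield_alt (b : Int) (widlst : List Int) : List Int :=
  -- bits = format(b & 0xff, '08b'): binary digits of the (nonnegative) low byte, zero-padded to 8
  let t := PySem.Int.toBinChars (PySem.Int.band b 255)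
  let bits := List.replicate (8 - t.length) '0' ++ t
  (widlst.foldl (fun (s : Int × List Int) i =>
      let chunk := PySem.List.slice bits (some s.1) (some (s.1 + i))
      let v := if chunk = [] then (0 : Int) else chunkVal chunk
      (s.1 + i, s.2 ++ [v])) ((0 : Int), ([] : List Int))).2

-- ===== PRECONDITION & SPEC =====
-- Pre_ excludes lists not summing to 8 (A's assert raises; B keeps the assert) and lists with a
-- negative width, on which A's swapped-pointer mask arithmetic yields accidental values (or a
-- TypeError from a negative exponent) that no caller would specify; B slices there instead.
def Pre_onebytefield (b : Int) (widlst : List Int) : Prop :=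
  widlst.sum = 8 ∧ ∀ i ∈ widlst, 0 ≤ i
instance (b : Int) (widlst : List Int) : Decidable (Pre_onebytefield b widlst) := by
  unfold Pre_onebytefield; infer_instance

def pvWitness_onebytefield : Int × List Int := (103, [1, 2, 5])

def Spec_onebytefield (b : Int) (widlst : List Int) (out : List Int) : Prop := out = onebytefield_alt b widlst
instance (b : Int) (widlst : List Int) (out : List Int) : Decidable (Spec_onebytefield b widlst out) := by unfold Spec_onebytefield; infer_instance

-- ===== CLAIM (what is proved, stated in full; the proofs are below) =====
def Claim_equal_onebytefield : Prop := ∀ (b : Int) (widlst : List Int), Dom_onebytefield b widlst → Pre_onebytefield b widlst → Spec_onebytefield b widlst (onebytefield b widlst)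

-- ===== LEMMAS AND PROOFS =====

-- recursive views of the two loops (proof-side only; A keeps left = right at loop entry)
def loopA (b : Int) : Int → List Int → List Int
  | _, [] => []
  | l, i :: t => extBit b l (l - i) :: loopA b (l - i) t

def mkbits (m : Int) : List Char :=
  List.replicate (8 - (PySem.Int.toBinChars m).length) '0' ++ PySem.Int.toBinChars m

def loopB (bits : List Char) : Int → List Int → List Int
  | _, [] => []
  | p, i :: t =>
      (let chunk := PySem.List.slice bits (some p) (some (p + i))
       if chunk = [] then (0 : Int) else chunkVal chunk) :: loopB bits (p + i) t

lemma foldA_eq (b : Int) : ∀ (ws : List Int) (l : Int) (acc : List Int),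
    (ws.foldl (fun (s : Int × Int × List Int) i =>
        let right := s.2.1 - i
        let v := extBit b s.1 right
        (s.1 - i, right, s.2.2 ++ [v])) (l, l, acc)).2.2 = acc ++ loopA b l ws := by
  intro ws
  induction ws with
  | nil => intro l acc; simp [loopA]
  | cons i t ih => intro l acc; simp only [List.foldl, loopA, ih]; simp

lemma foldB_eq (bits : List Char) : ∀ (ws : List Int) (p : Int) (acc : List Int),
    (ws.foldl (fun (s : Int × List Int) i =>
        let chunk := PySem.List.slice bits (some s.1) (some (s.1 + i))
        let v := if chunk = [] then (0 : Int) else chunkVal chunk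
        (s.1 + i, s.2 ++ [v])) (p, acc)).2 = acc ++ loopB bits p ws := by
  intro ws
  induction ws with
  | nil => intro p acc; simp [loopB]
  | cons i t ih => intro p acc; simp only [List.foldl, loopB, ih]; simp

-- a mask below 2^8 only reads the low byte of the other operand
lemma nat_and_mod (M : Nat) (hM : M < 256) (x : Nat) : M &&& x = M &&& (x % 256) := by
  apply Nat.eq_of_testBit_eq
  intro j
  rw [Nat.testBit_and, Nat.testBit_and, show (256:Nat) = 2^8 by norm_num,
      Nat.testBit_mod_two_pow]
  by_cases hj : j < 8
  · simp [hj]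
  · have hMj : M.testBit j = false := by
      apply Nat.testBit_lt_two_pow
      calc M < 256 := hM
        _ = 2 ^ 8 := by norm_num
        _ ≤ 2 ^ j := Nat.pow_le_pow_right (by norm_num) (by omega)
    simp [hMj]

set_option maxRecDepth 10000 in
set_option maxHeartbeats 4000000 in
lemma nat_sub_and : ∀ m : Nat, m < 256 → ∀ d : Nat, d < 256 → m - (m &&& d) = (255 - d) &&& m := by
  decide

-- b & M depends on b only through b % 256 when 0 ≤ M < 256 (covers negative b, Python semantics)
lemma band_reduce (b M : Int) (h0 : 0 ≤ M) (h1 : M < 256) :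
    PySem.Int.band b M = PySem.Int.band (b % 256) M := by
  by_cases hb : 0 ≤ b
  · have he : 0 ≤ b % 256 := Int.emod_nonneg b (by norm_num)
    rw [PySem.Int.band_of_nonneg hb h0, PySem.Int.band_of_nonneg he h0]
    congr 1
    have h2 : (b % 256).toNat = b.toNat % 256 := by omega
    rw [h2, Nat.and_comm, nat_and_mod M.toNat (by omega) b.toNat, Nat.and_comm]
  · set c : Nat := (-b - 1).toNat with hc
    have hcb : (c : Int) = -b - 1 := Int.toNat_of_nonneg (by omega)
    have hL : PySem.Int.band b M = ((M.toNat - (M.toNat &&& c) : Nat) : Int) := by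
      simp [PySem.Int.band, hb, h0, hc]
    have hemod : b % 256 = 255 - ((c % 256 : Nat) : Int) := by
      have h3 : ((c % 256 : Nat) : Int) = (c : Int) % 256 := by push_cast; ring
      omega
    have hge : 0 ≤ (255 : Int) - ((c % 256 : Nat) : Int) := by
      have : c % 256 < 256 := Nat.mod_lt _ (by norm_num)
      omega
    rw [hL, hemod, PySem.Int.band_of_nonneg hge h0]
    congr 1
    have ht : ((255 : Int) - ((c % 256 : Nat) : Int)).toNat = 255 - c % 256 := by omega
    rw [ht, nat_and_mod M.toNat (by omega) c,
        nat_sub_and M.toNat (by omega) (c % 256) (Nat.mod_lt _ (by norm_num))]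

set_option maxRecDepth 10000 in
lemma small_and_255 : ∀ n : Nat, n < 256 → n &&& 255 = n := by decide

lemma band255_eq_emod (b : Int) : PySem.Int.band b 255 = b % 256 := by
  rw [band_reduce b 255 (by norm_num) (by norm_num)]
  have he : 0 ≤ b % 256 := Int.emod_nonneg b (by norm_num)
  have hlt : b % 256 < 256 := Int.emod_lt_of_pos b (by norm_num)
  rw [PySem.Int.band_of_nonneg he (by norm_num)]
  have h255 : (255 : Int).toNat = 255 := rfl
  rw [h255, small_and_255 (b % 256).toNat (by omega)]
  exact Int.toNat_of_nonneg he

-- per-field agreement on the low byte, checked exhaustively over cursor, width and byte value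
set_option maxRecDepth 100000 in
set_option maxHeartbeats 4000000 in
lemma step_eq : ∀ s : Nat, s < 9 → ∀ i : Nat, i < 9 - s → ∀ n : Nat, n < 256 →
    extBit ((n : Nat) : Int) (8 - (s : Int)) (8 - (s : Int) - (i : Int)) =
      (let chunk := PySem.List.slice (mkbits ((n : Nat) : Int)) (some (s : Int)) (some ((s : Int) + (i : Int)))
       if chunk = [] then (0 : Int) else chunkVal chunk) := by
  decide

lemma sum_nonneg_int : ∀ (ws : List Int), (∀ i ∈ ws, 0 ≤ i) → 0 ≤ ws.sum := by
  intro ws h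
  induction ws with
  | nil => simp
  | cons i t ih =>
      simp only [List.sum_cons]
      have h1 := h i (by simp)
      have h2 := ih (fun j hj => h j (by simp [hj]))
      omega

lemma extBit_reduce (b : Int) (l r : Int) (hl : r ≤ l) (hl8 : l ≤ 8) :
    extBit b l r = extBit (b % 256) l r := by
  show (PySem.Int.band b (2 ^ l.toNat - 2 ^ r.toNat)) >>> r.toNat
      = (PySem.Int.band (b % 256) (2 ^ l.toNat - 2 ^ r.toNat)) >>> r.toNat
  have hmask0 : (0:Int) ≤ 2 ^ l.toNat - 2 ^ r.toNat := by
    have : (2:Int) ^ r.toNat ≤ 2 ^ l.toNat := by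
      apply pow_le_pow_right₀ (by norm_num); omega
    omega
  have hmask1 : (2:Int) ^ l.toNat - 2 ^ r.toNat < 256 := by
    have h1 : (2:Int) ^ l.toNat ≤ 2 ^ 8 := by
      apply pow_le_pow_right₀ (by norm_num); omega
    have h2 : (0:Int) < 2 ^ r.toNat := by positivity
    norm_num at h1 ⊢; omega
  rw [band_reduce b _ hmask0 hmask1]

lemma loops_eq (b : Int) : ∀ (ws : List Int) (s : Nat), s ≤ 8 → (∀ i ∈ ws, 0 ≤ i) →
    ws.sum + (s : Int) = 8 →
    loopA b (8 - (s : Int)) ws = loopB (mkbits (PySem.Int.band b 255)) (s : Int) ws := by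
  intro ws
  induction ws with
  | nil => intro s _ _ _; simp [loopA, loopB]
  | cons i t ih =>
      intro s hs hnn hsum
      have hi : 0 ≤ i := hnn i (by simp)
      have ht : 0 ≤ t.sum := sum_nonneg_int t (fun j hj => hnn j (by simp [hj]))
      simp only [List.sum_cons] at hsum
      have hbound : i + (s : Int) ≤ 8 := by omega
      set n : Nat := (b % 256).toNat with hn
      have hb0 : (0:Int) ≤ b % 256 := Int.emod_nonneg b (by norm_num)
      have hblt : b % 256 < 256 := Int.emod_lt_of_pos b (by norm_num)
      have hcastn : ((n : Nat) : Int) = b % 256 := Int.toNat_of_nonneg hb0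
      have hbits : mkbits (PySem.Int.band b 255) = mkbits ((n : Nat) : Int) := by
        rw [band255_eq_emod, hcastn]
      set iN : Nat := i.toNat with hiN
      have hcasti : ((iN : Nat) : Int) = i := Int.toNat_of_nonneg hi
      simp only [loopA, loopB, List.cons.injEq]
      refine ⟨?_, ?_⟩
      · have hstep := step_eq s (by omega) iN (by omega) n (by omega)
        rw [hbits, ← hcasti, ← hstep]
        rw [extBit_reduce b (8 - (s:Int)) (8 - (s:Int) - iN) (by omega) (by omega)]
        rw [hcastn]
      · have harith : (8 : Int) - (s : Int) - i = 8 - ((s + iN : Nat) : Int) := by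
          push_cast; omega
        have harith2 : (s : Int) + i = ((s + iN : Nat) : Int) := by push_cast; omega
        rw [harith, harith2, hbits, ← hbits]
        exact ih (s + iN) (by omega) (fun j hj => hnn j (by simp [hj])) (by push_cast; omega)

-- ===== VERDICT (by name: the statement is the Claim_ definition above) =====
theorem onebytefield_spec : Claim_equal_onebytefield := by
  intro b widlst _ hpre
  unfold Spec_onebytefield onebytefield onebytefield_alt
  rw [foldA_eq, foldB_eq]
  simp only [List.nil_append]
  have h := loops_eq b widlst 0 (by omega) hpre.2 (by simpa using hpre.1)
  simpa [mkbits] using h
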